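-- pv_equiv track=rewrite | github.com/rajesh95cs/wordgame | wordgame.py | pointdict
-- ===== SOURCE A (Python) =====
-- SCRABBLE_LETTER_VALUES = {
--     'a': 1, 'b': 3, 'c': 3, 'd': 2, 'e': 1, 'f': 4, 'g': 2, 'h': 4, 'i': 1,
--     'j': 8, 'k': 5, 'l': 1, 'm': 3, 'n': 1, 'o': 1, 'p': 3, 'q': 10, 'r': 1,
--     's': 1, 't': 1, 'u': 1, 'v': 4, 'w': 4, 'x': 8, 'y': 4, 'z': 10
-- }
--
-- def getFrequencyDict(sequence):
--     """
--     Given a sequence of letters, convert the sequence to a dictionary of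
--     letters -> frequencies. Used by containsLetters().
--
--     returns: dictionary of letters -> frequencies
--     """
--     freq = {}
--     for x in sequence:
--         freq[x] = freq.get(x,0) + 1
--     return freq
--
-- def getwordmaxscore(word):
--     valid = getFrequencyDict(word)
--     temp = 0
--     for i in word:
--         temp = temp+valid[i]*SCRABBLE_LETTER_VALUES[i]
--     return temp
--
-- def pointdict(wordlist):
--     dicc = {}
--     #print "working ?....."
--     for i in range(len(wordlist)):
--         #print "wordlist = ",wordlist
--         lenword = len(wordlist[i])
--         word = wordlist[i]
--         #print word
--         wordmaxscore = getwordmaxscore(word)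
--         #print "wordmaxscore = ",wordmaxscore
--         if lenword not in dicc.keys():
--             dicc[lenword] = {wordmaxscore: [word]}
--         else:
--             if wordmaxscore not in dicc[lenword].keys():
--                 dicc[lenword][wordmaxscore] = [word]
--             else:
--                 dicc[lenword][wordmaxscore].append(word)
--     return dicc
-- ===== SOURCE B (Python) =====
-- SCRABBLE_LETTER_VALUES = {
--     'a': 1, 'b': 3, 'c': 3, 'd': 2, 'e': 1, 'f': 4, 'g': 2, 'h': 4, 'i': 1,
--     'j': 8, 'k': 5, 'l': 1, 'm': 3, 'n': 1, 'o': 1, 'p': 3, 'q': 10, 'r': 1,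
--     's': 1, 't': 1, 'u': 1, 'v': 4, 'w': 4, 'x': 8, 'y': 4, 'z': 10
-- }
--
-- def getFrequencyDict(sequence):
--     freq = {}
--     for x in sequence:
--         freq[x] = freq.get(x, 0) + 1
--     return freq
--
-- def getwordmaxscore(word):
--     # each distinct letter with frequency c contributes c*c*value (A counts it
--     # c times at weight c*value per occurrence)
--     total = 0
--     for letter, c in getFrequencyDict(word).items():
--         total += c * c * SCRABBLE_LETTER_VALUES[letter]
--     return total
--
-- def pointdict(wordlist):
--     dicc = {}
--     for word in wordlist:
--         dicc.setdefault(len(word), {}).setdefault(getwordmaxscore(word), []).append(word)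
--     return dicc
-- ===== Notes on version B (the rewrite author's own statement) =====
-- stated objective: simpler
-- what changed: Score is computed by one pass over the frequency dict's items summing count*count*value (instead of A's per-position loop multiplying frequency by value at every occurrence), and the nested grouping is a single setdefault chain over the words themselves instead of A's index loop with a three-way membership if/else.
import Mathlib
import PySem

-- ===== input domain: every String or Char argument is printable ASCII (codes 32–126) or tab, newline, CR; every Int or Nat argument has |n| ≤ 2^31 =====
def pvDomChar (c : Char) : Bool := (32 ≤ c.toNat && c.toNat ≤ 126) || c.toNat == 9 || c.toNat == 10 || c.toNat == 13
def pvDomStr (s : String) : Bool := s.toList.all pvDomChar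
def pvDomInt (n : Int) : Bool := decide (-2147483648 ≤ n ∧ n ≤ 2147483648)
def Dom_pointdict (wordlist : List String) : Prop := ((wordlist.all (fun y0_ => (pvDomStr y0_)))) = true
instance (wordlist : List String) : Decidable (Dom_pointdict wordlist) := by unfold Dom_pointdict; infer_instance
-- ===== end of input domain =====

-- B scores a word in one pass over its frequency dict's items (count*count*value) and groups words
-- with a single setdefault chain per word, replacing A's per-position score loop and index-driven
-- three-way if/else grouping; objective: simpler, same exact results.

-- ===== PORT A =====
def scrabbleLetterValues : PySem.Dict Char Int := PySem.Dict.ofList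
  [('a',1),('b',3),('c',3),('d',2),('e',1),('f',4),('g',2),('h',4),('i',1),
   ('j',8),('k',5),('l',1),('m',3),('n',1),('o',1),('p',3),('q',10),('r',1),
   ('s',1),('t',1),('u',1),('v',4),('w',4),('x',8),('y',4),('z',10)]

def getFrequencyDict (sequence : List Char) : PySem.Dict Char Int :=
  sequence.foldl (fun freq x => freq.insert x (freq.getD x 0 + 1)) PySem.Dict.empty

-- lookups valid[i] and SCRABBLE_LETTER_VALUES[i] are ported with getD; on Pre_ (lowercase words)
-- both keys are always present, exactly where the Python does not raise KeyError
def getwordmaxscore (word : String) : Int :=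
  let valid := getFrequencyDict word.toList
  word.toList.foldl (fun temp i => temp + valid.getD i 0 * scrabbleLetterValues.getD i 0) 0

-- loop body of A's 'for i in range(len(wordlist))', applied to word = wordlist[i]
def pointdictStep (dicc : PySem.Dict Int (PySem.Dict Int (List String))) (word : String) :
    PySem.Dict Int (PySem.Dict Int (List String)) :=
  let lenword : Int := PySem.Str.len word
  let wordmaxscore := getwordmaxscore word
  if dicc.contains lenword = false then
    dicc.insert lenword (PySem.Dict.ofList [(wordmaxscore, [word])])
  else
    if (dicc.getD lenword PySem.Dict.empty).contains wordmaxscore = false then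
      dicc.modify lenword PySem.Dict.empty (fun inner => inner.insert wordmaxscore [word])
    else
      dicc.modify lenword PySem.Dict.empty (fun inner => inner.modify wordmaxscore [] (· ++ [word]))

def pointdict (wordlist : List String) : List (Int × List (Int × List String)) :=
  ((PySem.List.pyRange 0 (wordlist.length : Int) 1).foldl
      (fun dicc i => pointdictStep dicc (PySem.List.pyGetD wordlist i "")) PySem.Dict.empty).items.map
    (fun p => (p.1, p.2.items))

-- ===== PORT B =====
def getwordmaxscoreAlt (word : String) : Int :=
  (getFrequencyDict word.toList).items.foldl
    (fun total p => total + p.2 * p.2 * scrabbleLetterValues.getD p.1 0) 0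

-- loop body of B's 'for word in wordlist' setdefault chain (mutation rendered immutably)
def pointdictStepAlt (dicc : PySem.Dict Int (PySem.Dict Int (List String))) (word : String) :
    PySem.Dict Int (PySem.Dict Int (List String)) :=
  let inner := dicc.getD (PySem.Str.len word) PySem.Dict.empty
  let s := getwordmaxscoreAlt word
  dicc.insert (PySem.Str.len word) (inner.insert s (inner.getD s [] ++ [word]))

def pointdict_alt (wordlist : List String) : List (Int × List (Int × List String)) :=
  (wordlist.foldl pointdictStepAlt PySem.Dict.empty).items.map (fun p => (p.1, p.2.items))

-- ===== PRECONDITION & SPEC =====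
-- Pre_ excludes exactly the inputs where Python A raises: any word with a character outside
-- 'a'..'z' hits a KeyError in SCRABBLE_LETTER_VALUES[i]
def Pre_pointdict (wordlist : List String) : Prop :=
  (wordlist.all (fun w => w.toList.all (fun c => 97 ≤ c.toNat && c.toNat ≤ 122))) = true
instance (wordlist : List String) : Decidable (Pre_pointdict wordlist) := by
  unfold Pre_pointdict; infer_instance
def pvWitness_pointdict : List String := (["ab"])

def Spec_pointdict (wordlist : List String) (out : List (Int × List (Int × List String))) : Prop := out = pointdict_alt wordlist
instance (wordlist : List String) (out : List (Int × List (Int × List String))) : Decidable (Spec_pointdict wordlist out) := by unfold Spec_pointdict; infer_instance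

-- ===== CLAIM (what is proved, stated in full; the proofs are below) =====
def Claim_equal_pointdict : Prop := ∀ (wordlist : List String), Dom_pointdict wordlist → Pre_pointdict wordlist → Spec_pointdict wordlist (pointdict wordlist)

-- ===== LEMMAS AND PROOFS =====

-- replacing g by g' that differs only at a ∈ S (by d) shifts the sum over nodup S by d
lemma map_sum_update (S : List Char) (hn : S.Nodup) (a : Char) (ha : a ∈ S)
    (g g' : Char → Int) (d : Int) (hga : g' a = g a + d)
    (hne : ∀ k ∈ S, k ≠ a → g' k = g k) :
    (S.map g').sum = (S.map g).sum + d := by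
  induction S with
  | nil => cases ha
  | cons b S ih =>
    rcases List.nodup_cons.mp hn with ⟨hb, hS⟩
    rcases List.mem_cons.mp ha with h | h
    · subst h
      have hrest : S.map g' = S.map g :=
        List.map_congr_left (fun k hk => hne k (List.mem_cons_of_mem _ hk) (fun e => hb (e ▸ hk)))
      simp [hrest, hga]; ring
    · have hba : b ≠ a := fun e => hb (e ▸ h)
      rw [List.map_cons, List.map_cons, List.sum_cons, List.sum_cons,
        hne b (List.mem_cons_self) hba,
        ih hS h (fun k hk hk' => hne k (List.mem_cons_of_mem _ hk) hk')]
      ring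

-- a position-wise sum equals the first-occurrence-deduplicated sum weighted by counts
lemma sum_count_weight (w : List Char) (f : Char → Int) :
    (w.map f).sum = ((PySem.Set.ofList w).map (fun k => (w.count k : Int) * f k)).sum := by
  induction w using List.reverseRecOn with
  | nil => simp
  | append_singleton xs a ih =>
    rw [PySem.Set.ofList_append_singleton]
    by_cases hmem : a ∈ xs
    · have hadd : PySem.Set.add (PySem.Set.ofList xs) a = PySem.Set.ofList xs := by
        simp [PySem.Set.add, PySem.Set.contains, PySem.Set.mem_ofList, hmem]
      rw [hadd]
      have hupd := map_sum_update (PySem.Set.ofList xs) (PySem.Set.nodup_ofList xs) a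
        ((PySem.Set.mem_ofList xs a).mpr hmem)
        (fun k => (xs.count k : Int) * f k)
        (fun k => ((xs ++ [a]).count k : Int) * f k) (f a)
        (by simp [List.count_append]; ring)
        (by intro k _ hk
            simp only [List.count_append, List.count_singleton]
            have : ¬ (a = k) := fun e => hk e.symm
            simp [this])
      rw [hupd, ← ih]
      simp
    · have hadd : PySem.Set.add (PySem.Set.ofList xs) a = PySem.Set.ofList xs ++ [a] := by
        simp [PySem.Set.add, PySem.Set.contains, PySem.Set.mem_ofList, hmem]
      have hcong : (PySem.Set.ofList xs).map (fun k => ((xs ++ [a]).count k : Int) * f k)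
          = (PySem.Set.ofList xs).map (fun k => (xs.count k : Int) * f k) := by
        refine List.map_congr_left (fun k hk => ?_)
        have hk' : ¬ (a = k) := fun e => hmem (e ▸ (PySem.Set.mem_ofList xs k).mp hk)
        simp [List.count_append, hk']
      rw [hadd]
      simp only [List.map_append, List.sum_append]
      rw [hcong, ← ih]
      have h0 : xs.count a = 0 := List.count_eq_zero.mpr hmem
      simp [List.count_append, h0]

-- the two word scores coincide
lemma score_eq (word : String) : getwordmaxscore word = getwordmaxscoreAlt word := by
  unfold getwordmaxscore getwordmaxscoreAlt
  have hfreq : getFrequencyDict word.toList = PySem.Dict.counter word.toList :=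
    PySem.Dict.foldl_insert_getD_add_one_eq_counter word.toList
  rw [hfreq, PySem.List.foldl_add, PySem.List.foldl_add, PySem.Dict.items_counter,
    List.map_map, zero_add, zero_add]
  have hl : word.toList.map (fun i => (PySem.Dict.counter word.toList).getD i 0 * scrabbleLetterValues.getD i 0)
      = word.toList.map (fun i => (word.toList.count i : Int) * scrabbleLetterValues.getD i 0) := by
    refine List.map_congr_left (fun i _ => ?_)
    rw [PySem.Dict.getD_counter]
  rw [hl, sum_count_weight word.toList (fun i => (word.toList.count i : Int) * scrabbleLetterValues.getD i 0)]
  refine congrArg List.sum (List.map_congr_left (fun k _ => ?_))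
  simp; ring

-- per-word step equality: A's three-way if/else is B's setdefault chain
lemma step_eq (dicc : PySem.Dict Int (PySem.Dict Int (List String))) (word : String) :
    pointdictStep dicc word = pointdictStepAlt dicc word := by
  unfold pointdictStep pointdictStepAlt
  rw [score_eq]
  by_cases h : dicc.contains (PySem.Str.len word) = false
  · rw [if_pos h, PySem.Dict.getD_of_not_contains dicc _ h]
    rfl
  · rw [if_neg h]
    by_cases h2 : (dicc.getD (PySem.Str.len word) PySem.Dict.empty).contains (getwordmaxscoreAlt word) = false
    · rw [if_pos h2]
      have h3 := PySem.Dict.getD_of_not_contains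
        (dicc.getD (PySem.Str.len word) PySem.Dict.empty) ([] : List String) h2
      simp only [h3]
      rfl
    · rw [if_neg h2]
      rfl

-- the two loop bodies are the same function
lemma stepFun_eq : pointdictStep = pointdictStepAlt :=
  funext fun d => funext fun w => step_eq d w

-- ===== VERDICT (by name: the statement is the Claim_ definition above) =====
theorem pointdict_spec : Claim_equal_pointdict := by
  intro wordlist _ _
  unfold Spec_pointdict pointdict pointdict_alt
  rw [PySem.List.foldl_pyRange_zero_pyGetD' wordlist "" pointdictStep PySem.Dict.empty, stepFun_eq]
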